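-- pv_equiv track=rewrite | github.com/panqec/panqec | bn3d/tc3d/_rotated_infzbias_decoder.py | split_posts_at_active_fences
-- ===== SOURCE A (Python) =====
-- from typing import Dict, Tuple, List
--
-- def split_posts_at_active_fences(
--     active_fences: list, n_fences: int
-- ) -> List[List[int]]:
--     posts = list(range(n_fences + 1))
--     segments = []
--     segment = []
--     for post in posts:
--         segment.append(post)
--         if post in active_fences:
--             segments.append(segment)
--             segment = []
--     segments.append(segment)
--     return segments
-- ===== SOURCE B (Python) =====
-- def split_posts_at_active_fences(active_fences, n_fences):
--     cuts = sorted(set(f for f in active_fences if 0 <= f <= n_fences))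
--     segments = []
--     start = 0
--     for c in cuts:
--         segments.append(list(range(start, c + 1)))
--         start = c + 1
--     segments.append(list(range(start, n_fences + 1)))
--     return segments
-- ===== Notes on version B (the rewrite author's own statement) =====
-- stated objective: faster
-- what changed: Instead of scanning every post 0..n with an 'in active_fences' membership test, B sorts the deduplicated in-range fences once and emits each segment as a whole range slice between consecutive cuts.
import Mathlib
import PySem

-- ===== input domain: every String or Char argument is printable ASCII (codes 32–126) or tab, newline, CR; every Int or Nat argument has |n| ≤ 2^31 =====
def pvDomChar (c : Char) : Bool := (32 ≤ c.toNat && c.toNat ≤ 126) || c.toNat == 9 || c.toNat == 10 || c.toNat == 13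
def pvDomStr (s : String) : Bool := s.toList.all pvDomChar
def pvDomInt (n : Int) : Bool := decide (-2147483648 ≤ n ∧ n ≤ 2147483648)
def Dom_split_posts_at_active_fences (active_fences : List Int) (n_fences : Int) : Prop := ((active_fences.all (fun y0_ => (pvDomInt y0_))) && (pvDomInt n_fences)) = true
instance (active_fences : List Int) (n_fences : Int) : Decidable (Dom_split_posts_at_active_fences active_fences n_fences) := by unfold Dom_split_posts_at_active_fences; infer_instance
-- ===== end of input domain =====

-- B scans the sorted deduplicated in-range fences and emits each segment as one whole range,
-- instead of A's per-post scan with an 'in active_fences' membership test.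

-- ===== PORT A =====
-- the for-loop over posts, carrying (segments, segment)
def pvLoopA (active_fences : List Int) (posts : List Int)
    (segments : List (List Int)) (segment : List Int) : List (List Int) :=
  match posts with
  | [] => segments ++ [segment]
  | post :: rest =>
    if post ∈ active_fences then
      pvLoopA active_fences rest (segments ++ [segment ++ [post]]) []
    else
      pvLoopA active_fences rest segments (segment ++ [post])

def split_posts_at_active_fences (active_fences : List Int) (n_fences : Int) : List (List Int) :=
  pvLoopA active_fences (PySem.List.pyRange 0 (n_fences + 1) 1) [] []

-- ===== PORT B =====
-- the for-loop over the sorted cut points, carrying (segments, start)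
def pvLoopB (cuts : List Int) (n_fences : Int)
    (segments : List (List Int)) (start : Int) : List (List Int) :=
  match cuts with
  | [] => segments ++ [PySem.List.pyRange start (n_fences + 1) 1]
  | c :: rest => pvLoopB rest n_fences (segments ++ [PySem.List.pyRange start (c + 1) 1]) (c + 1)

def split_posts_at_active_fences_alt (active_fences : List Int) (n_fences : Int) : List (List Int) :=
  pvLoopB
    (PySem.List.sorted
      (PySem.Set.ofList (active_fences.filter (fun f => decide (0 ≤ f) && decide (f ≤ n_fences))))
      (fun x => x) false)
    n_fences [] 0

-- ===== PRECONDITION & SPEC =====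
def Spec_split_posts_at_active_fences (active_fences : List Int) (n_fences : Int) (out : List (List Int)) : Prop := out = split_posts_at_active_fences_alt active_fences n_fences
instance (active_fences : List Int) (n_fences : Int) (out : List (List Int)) : Decidable (Spec_split_posts_at_active_fences active_fences n_fences out) := by unfold Spec_split_posts_at_active_fences; infer_instance

-- ===== CLAIM (what is proved, stated in full; the proofs are below) =====
def Claim_equal_split_posts_at_active_fences : Prop := ∀ (active_fences : List Int) (n_fences : Int), Dom_split_posts_at_active_fences active_fences n_fences → Spec_split_posts_at_active_fences active_fences n_fences (split_posts_at_active_fences active_fences n_fences)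

-- ===== LEMMAS AND PROOFS =====

-- over a stretch of posts none of which is an active fence, A's loop only grows the current segment
lemma pvLoopA_skip (af rest : List Int) :
    ∀ (k : Nat) (lo hi : Int) (segs : List (List Int)) (seg : List Int),
      (hi - lo).toNat = k → (∀ p, lo ≤ p → p < hi → p ∉ af) →
      pvLoopA af (PySem.List.pyRange lo hi 1 ++ rest) segs seg
        = pvLoopA af rest segs (seg ++ PySem.List.pyRange lo hi 1) := by
  intro k
  induction k with
  | zero =>
    intro lo hi segs seg hk _
    have h : hi ≤ lo := by omega
    simp [PySem.List.pyRange_one_eq_nil h]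
  | succ k ih =>
    intro lo hi segs seg hk hno
    have hlt : lo < hi := by omega
    rw [PySem.List.pyRange_one_cons hlt]
    have hni : lo ∉ af := hno lo le_rfl hlt
    simp only [List.cons_append, pvLoopA, if_neg hni]
    rw [ih (lo + 1) hi segs (seg ++ [lo]) (by omega)
        (fun p h1 h2 => hno p (by omega) h2)]
    simp

-- A's loop over posts lo..n equals B's loop over the remaining sorted cuts
lemma pvLoopA_eq_pvLoopB (af : List Int) (n : Int) :
    ∀ (cuts : List Int) (lo : Int) (segs : List (List Int)),
      cuts.Pairwise (· < ·) →
      (∀ c ∈ cuts, lo ≤ c ∧ c ≤ n) →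
      (∀ p, lo ≤ p → p ≤ n → (p ∈ af ↔ p ∈ cuts)) →
      pvLoopA af (PySem.List.pyRange lo (n + 1) 1) segs [] = pvLoopB cuts n segs lo := by
  intro cuts
  induction cuts with
  | nil =>
    intro lo segs _ _ hmem
    have := pvLoopA_skip af [] (n + 1 - lo).toNat lo (n + 1) segs [] rfl
      (fun p h1 h2 => by
        intro hp
        have hx := (hmem p h1 (by omega)).mp hp
        simp at hx)
    simpa [pvLoopA, pvLoopB] using this
  | cons c rest ih =>
    intro lo segs hpw hbnd hmem
    obtain ⟨hlo, hcn⟩ := hbnd c (List.mem_cons_self ..)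
    have hrest : ∀ r ∈ rest, c < r := (List.pairwise_cons.mp hpw).1
    -- split posts at c
    rw [PySem.List.pyRange_one_append lo c (n + 1) hlo (by omega),
        PySem.List.pyRange_one_cons (show c < n + 1 by omega)]
    rw [pvLoopA_skip af (c :: PySem.List.pyRange (c + 1) (n + 1) 1) (c - lo).toNat lo c segs [] rfl
        (fun p h1 h2 => by
          intro hp
          have hx := (hmem p h1 (by omega)).mp hp
          rw [List.mem_cons] at hx
          rcases hx with h | h
          · omega
          · exact absurd (hrest p h) (by omega))]
    have hcaf : c ∈ af := (hmem c hlo hcn).mpr (List.mem_cons_self ..)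
    simp only [pvLoopA, if_pos hcaf, List.nil_append]
    rw [← PySem.List.pyRange_one_succ_right hlo]
    rw [ih (c + 1) (segs ++ [PySem.List.pyRange lo (c + 1) 1])
        (List.pairwise_cons.mp hpw).2
        (fun r hr => ⟨by have := hrest r hr; omega, (hbnd r (List.mem_cons_of_mem _ hr)).2⟩)
        (fun p h1 h2 => by
          rw [hmem p (by omega) h2, List.mem_cons]
          constructor
          · rintro (h | h)
            · omega
            · exact h
          · exact Or.inr)]
    rfl

-- ===== VERDICT (by name: the statement is the Claim_ definition above) =====
theorem split_posts_at_active_fences_spec : Claim_equal_split_posts_at_active_fences := by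
  intro af n _
  unfold Spec_split_posts_at_active_fences split_posts_at_active_fences split_posts_at_active_fences_alt
  set cuts := PySem.List.sorted
      (PySem.Set.ofList (af.filter (fun f => decide (0 ≤ f) && decide (f ≤ n))))
      (fun x => x) false with hcuts
  have hmemc : ∀ p, p ∈ cuts ↔ p ∈ af ∧ 0 ≤ p ∧ p ≤ n := by
    intro p
    rw [hcuts, PySem.List.mem_sorted, PySem.Set.mem_ofList, List.mem_filter]
    simp
  apply pvLoopA_eq_pvLoopB
  · exact PySem.List.sorted_ofList_pairwise_lt _
  · intro c hc
    have := (hmemc c).mp hc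
    exact ⟨this.2.1, this.2.2⟩
  · intro p h1 h2
    rw [hmemc p]
    tauto
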